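-- pv_equiv track=rewrite | github.com/cdghhhiilnnotu/Chatbot-Server-1 | modules/tools/course/utils.py | find_available
-- ===== SOURCE A (Python) =====
-- def find_available(time_hp, time_tkb):
--     non_coincidence = {}
--
--     for dk_class, dk_schedule in time_hp.items():
--         is_fully_coinciding = False  # Flag to check if any date-period coincides
--
--         for date, dk_periods in dk_schedule.items():
--             for tkb_class, tkb_schedule in time_tkb.items():
--                 if date in tkb_schedule:
--                     # Check for any overlap in periods
--                     if any(period in dk_periods for period in tkb_schedule[date]):
--                         is_fully_coinciding = True
--                         break
--             if is_fully_coinciding: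
--                 break
--
--         # If no date-period coincides for the entire item, add it to the result
--         if not is_fully_coinciding:
--             non_coincidence[dk_class] = dk_schedule
--
--     return non_coincidence
-- ===== SOURCE B (Python) =====
-- def find_available(time_hp, time_tkb):
--     # Precompute date -> set of occupied periods from the timetable once,
--     # then test each schedule class against that index.
--     occupied = {}
--     for tkb_schedule in time_tkb.values():
--         for date, periods in tkb_schedule.items():
--             occupied.setdefault(date, set()).update(periods)
--
--     non_coincidence = {}
--     for dk_class, dk_schedule in time_hp.items():
--         if all(p not in occupied.get(date, ())
--                for date, dk_periods in dk_schedule.items()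
--                for p in dk_periods):
--             non_coincidence[dk_class] = dk_schedule
--     return non_coincidence
-- ===== Notes on version B (the rewrite author's own statement) =====
-- stated objective: faster
-- what changed: Instead of re-scanning every timetable class for every date of every schedule class (with list-membership period tests), B builds a date->set-of-periods index over the timetable once and checks each schedule class against that hash index.
import Mathlib
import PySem

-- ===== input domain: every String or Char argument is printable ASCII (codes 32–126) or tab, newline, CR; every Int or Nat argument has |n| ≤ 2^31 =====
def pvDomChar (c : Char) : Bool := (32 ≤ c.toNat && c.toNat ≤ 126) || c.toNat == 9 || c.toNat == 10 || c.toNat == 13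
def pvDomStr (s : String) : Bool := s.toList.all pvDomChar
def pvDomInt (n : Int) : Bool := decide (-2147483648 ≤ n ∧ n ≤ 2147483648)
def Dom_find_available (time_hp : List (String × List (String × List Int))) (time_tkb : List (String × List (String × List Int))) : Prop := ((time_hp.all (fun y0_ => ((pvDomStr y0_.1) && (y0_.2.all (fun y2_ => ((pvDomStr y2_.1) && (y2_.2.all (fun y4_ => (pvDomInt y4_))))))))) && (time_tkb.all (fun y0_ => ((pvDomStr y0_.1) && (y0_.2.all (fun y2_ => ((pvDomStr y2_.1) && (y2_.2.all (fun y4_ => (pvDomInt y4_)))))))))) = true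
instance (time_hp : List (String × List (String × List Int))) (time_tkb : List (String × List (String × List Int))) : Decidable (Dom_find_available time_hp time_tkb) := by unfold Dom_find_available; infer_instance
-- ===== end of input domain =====

-- B replaces A's nested rescans of the timetable by a date->set-of-periods index built once (faster, asymptotic).


-- ===== PORT A =====
-- inner loop: 'for tkb_class, tkb_schedule in time_tkb.items(): if date in tkb_schedule: if any(...): break'
def faInner (date : String) (dk_periods : List Int) : List (String × List (String × List Int)) → Bool
  | [] => false
  | (_, tkb_schedule) :: rest =>
    match (PySem.Dict.mk tkb_schedule).get? date with
    | some ps => if ps.any (fun period => dk_periods.contains period) then true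
                 else faInner date dk_periods rest
    | none => faInner date dk_periods rest

-- outer loop over dk_schedule with the is_fully_coinciding flag / break
def faOuter (time_tkb : List (String × List (String × List Int))) : List (String × List Int) → Bool
  | [] => false
  | (date, dk_periods) :: rest =>
    if faInner date dk_periods time_tkb then true else faOuter time_tkb rest

def find_available (time_hp : List (String × List (String × List Int))) (time_tkb : List (String × List (String × List Int))) : List (String × List (String × List Int)) :=
  (time_hp.foldl
    (fun non_coincidence p =>
      if faOuter time_tkb p.2 then non_coincidence
      else non_coincidence.insert p.1 p.2)
    (PySem.Dict.empty : PySem.Dict String (List (String × List Int)))).items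

-- ===== PORT B =====
-- occupied: date -> set of periods, built in one pass over time_tkb (setdefault(date, set()).update(periods))
def fbOccupied (time_tkb : List (String × List (String × List Int))) : PySem.Dict String (PySem.Set Int) :=
  time_tkb.foldl
    (fun occ p =>
      p.2.foldl
        (fun occ q => occ.insert q.1 (PySem.Set.update (occ.getD q.1 PySem.Set.empty) q.2))
        occ)
    PySem.Dict.empty

-- 'all(p not in occupied.get(date, ()) for date, dk_periods in dk_schedule.items() for p in dk_periods)'
def fbFree (occ : PySem.Dict String (PySem.Set Int)) (dk_schedule : List (String × List Int)) : Bool :=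
  dk_schedule.all (fun q => q.2.all (fun p => !(PySem.Set.contains (occ.getD q.1 PySem.Set.empty) p)))

def find_available_alt (time_hp : List (String × List (String × List Int))) (time_tkb : List (String × List (String × List Int))) : List (String × List (String × List Int)) :=
  let occ := fbOccupied time_tkb
  (time_hp.foldl
    (fun non_coincidence p =>
      if fbFree occ p.2 then non_coincidence.insert p.1 p.2
      else non_coincidence)
    (PySem.Dict.empty : PySem.Dict String (List (String × List Int)))).items

-- ===== PRECONDITION & SPEC =====
-- Pre_ excludes association lists in which some timetable class's schedule repeats a date key: such duplicate
-- keys cannot arise from a Python dict, and A's first-match lookup vs B's union over occurrences is an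
-- artefact of the dict-as-list encoding there.
def Pre_find_available (time_hp : List (String × List (String × List Int))) (time_tkb : List (String × List (String × List Int))) : Prop :=
  ∀ p ∈ time_tkb, (p.2.map Prod.fst).Nodup
instance (time_hp : List (String × List (String × List Int))) (time_tkb : List (String × List (String × List Int))) : Decidable (Pre_find_available time_hp time_tkb) := by unfold Pre_find_available; infer_instance
def pvWitness_find_available : (List (String × List (String × List Int))) × (List (String × List (String × List Int))) :=
  ([("A", [("mon", [1, 2])]), ("B", [("tue", [3])])], [("T", [("mon", [2, 4]), ("tue", [5])])])

def Spec_find_available (time_hp : List (String × List (String × List Int))) (time_tkb : List (String × List (String × List Int))) (out : List (String × List (String × List Int))) : Prop := out = find_available_alt time_hp time_tkb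
instance (time_hp : List (String × List (String × List Int))) (time_tkb : List (String × List (String × List Int))) (out : List (String × List (String × List Int))) : Decidable (Spec_find_available time_hp time_tkb out) := by unfold Spec_find_available; infer_instance

-- ===== CLAIM (what is proved, stated in full; the proofs are below) =====
def Claim_equal_find_available : Prop := ∀ (time_hp : List (String × List (String × List Int))) (time_tkb : List (String × List (String × List Int))), Dom_find_available time_hp time_tkb → Pre_find_available time_hp time_tkb → Spec_find_available time_hp time_tkb (find_available time_hp time_tkb)

-- ===== LEMMAS AND PROOFS =====

-- membership in the occupied index: p is occupied on `date` iff some timetable pair lists it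
theorem mem_occ_inner (l : List (String × List Int)) (d : PySem.Dict String (PySem.Set Int)) (date : String) (p : Int) :
    (p ∈ (l.foldl (fun occ q => occ.insert q.1 (PySem.Set.update (occ.getD q.1 PySem.Set.empty) q.2)) d).getD date PySem.Set.empty)
      ↔ p ∈ d.getD date PySem.Set.empty ∨ ∃ q ∈ l, q.1 = date ∧ p ∈ q.2 := by
  induction l generalizing d with
  | nil => simp
  | cons a l ih =>
    simp only [List.foldl_cons, ih, List.mem_cons]
    rw [PySem.Dict.getD_insert]
    split_ifs with h
    · subst h
      simp only [PySem.Set.mem_update]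
      constructor
      · rintro ((hp | hpa) | ⟨q, hq, h1, hpq⟩)
        · exact Or.inl hp
        · exact Or.inr ⟨a, Or.inl rfl, rfl, hpa⟩
        · exact Or.inr ⟨q, Or.inr hq, h1, hpq⟩
      · rintro (hp | ⟨q, (rfl | hq), h1, hpq⟩)
        · exact Or.inl (Or.inl hp)
        · exact Or.inl (Or.inr hpq)
        · exact Or.inr ⟨q, hq, h1, hpq⟩
    · constructor
      · rintro (hp | ⟨q, hq, h1, hpq⟩)
        · exact Or.inl hp
        · exact Or.inr ⟨q, Or.inr hq, h1, hpq⟩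
      · rintro (hp | ⟨q, (rfl | hq), h1, hpq⟩)
        · exact Or.inl hp
        · exact (h h1.symm).elim
        · exact Or.inr ⟨q, hq, h1, hpq⟩

theorem mem_occ_outer (tkb : List (String × List (String × List Int))) (d : PySem.Dict String (PySem.Set Int)) (date : String) (p : Int) :
    (p ∈ (tkb.foldl (fun occ t => t.2.foldl (fun occ q => occ.insert q.1 (PySem.Set.update (occ.getD q.1 PySem.Set.empty) q.2)) occ) d).getD date PySem.Set.empty)
      ↔ p ∈ d.getD date PySem.Set.empty ∨ ∃ t ∈ tkb, ∃ q ∈ t.2, q.1 = date ∧ p ∈ q.2 := by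
  induction tkb generalizing d with
  | nil => simp
  | cons a l ih =>
    rw [List.foldl_cons, ih, mem_occ_inner]
    simp only [List.mem_cons]
    constructor
    · rintro ((hp | ⟨q, hq, rfl, hpq⟩) | ⟨t, ht, hrest⟩)
      · exact Or.inl hp
      · exact Or.inr ⟨a, Or.inl rfl, q, hq, rfl, hpq⟩
      · exact Or.inr ⟨t, Or.inr ht, hrest⟩
    · rintro (hp | ⟨t, (rfl | ht), hrest⟩)
      · exact Or.inl (Or.inl hp)
      · exact Or.inl (Or.inr hrest)
      · exact Or.inr ⟨t, ht, hrest⟩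

theorem mem_occ (time_tkb : List (String × List (String × List Int))) (date : String) (p : Int) :
    (p ∈ (fbOccupied time_tkb).getD date PySem.Set.empty)
      ↔ ∃ t ∈ time_tkb, ∃ q ∈ t.2, q.1 = date ∧ p ∈ q.2 := by
  unfold fbOccupied
  rw [mem_occ_outer]
  simp

-- A's inner scan as an existential (first-match lookup into each timetable class)
theorem faInner_iff (date : String) (dkp : List Int) (tkb : List (String × List (String × List Int))) :
    faInner date dkp tkb = true ↔
      ∃ t ∈ tkb, ∃ ps, (PySem.Dict.mk t.2).get? date = some ps ∧ ∃ p ∈ ps, p ∈ dkp := by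
  induction tkb with
  | nil => simp [faInner]
  | cons a l ih =>
    simp only [faInner, List.mem_cons]
    cases h : (PySem.Dict.mk a.2).get? date with
    | none =>
      rw [ih]
      constructor
      · rintro ⟨t, ht, hrest⟩; exact ⟨t, Or.inr ht, hrest⟩
      · rintro ⟨t, (rfl | ht), ps, hps, hover⟩
        · simp [h] at hps
        · exact ⟨t, ht, ps, hps, hover⟩
    | some ps =>
      by_cases hov : ps.any (fun period => dkp.contains period) = true
      · simp only [hov, if_true, true_iff]
        refine ⟨a, Or.inl rfl, ps, h, ?_⟩
        simpa [List.any_eq_true] using hov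
      · simp only [hov, if_false, ih, Bool.false_eq_true]
        constructor
        · rintro ⟨t, ht, hrest⟩; exact ⟨t, Or.inr ht, hrest⟩
        · rintro ⟨t, (rfl | ht), ps', hps', hover⟩
          · rw [h] at hps'
            cases hps'
            exact absurd (by simpa [List.any_eq_true] using hover) hov
          · exact ⟨t, ht, ps', hps', hover⟩

-- with nodup date keys, first-match lookup = any occurrence
theorem get?_mk_iff (l : List (String × List Int)) (hnd : (l.map Prod.fst).Nodup) (date : String) (ps : List Int) :
    (PySem.Dict.mk l).get? date = some ps ↔ (date, ps) ∈ l := by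
  have := PySem.Dict.get?_eq_some_iff_mem_items (d := PySem.Dict.mk l) (k := date) (v := ps)
    (by simpa [PySem.Dict.keys] using hnd)
  exact this

theorem occ_contains_iff (time_tkb : List (String × List (String × List Int)))
    (hnd : ∀ t ∈ time_tkb, (t.2.map Prod.fst).Nodup) (date : String) (p : Int) :
    PySem.Set.contains ((fbOccupied time_tkb).getD date PySem.Set.empty) p = true
      ↔ ∃ t ∈ time_tkb, ∃ ps, (PySem.Dict.mk t.2).get? date = some ps ∧ p ∈ ps := by
  rw [PySem.Set.contains_iff, mem_occ]
  constructor
  · rintro ⟨t, ht, q, hq, h1, hpq⟩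
    subst h1
    exact ⟨t, ht, q.2, (get?_mk_iff t.2 (hnd t ht) q.1 q.2).2 hq, hpq⟩
  · rintro ⟨t, ht, ps, hps, hpps⟩
    exact ⟨t, ht, (date, ps), (get?_mk_iff t.2 (hnd t ht) date ps).1 hps, rfl, hpps⟩

-- the two per-class predicates are complementary
theorem faOuter_eq (time_tkb : List (String × List (String × List Int)))
    (hnd : ∀ t ∈ time_tkb, (t.2.map Prod.fst).Nodup) (sched : List (String × List Int)) :
    faOuter time_tkb sched = !(fbFree (fbOccupied time_tkb) sched) := by
  induction sched with
  | nil => rfl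
  | cons a l ih =>
    have hhead : faInner a.1 a.2 time_tkb
        = !(a.2.all (fun p => !(PySem.Set.contains ((fbOccupied time_tkb).getD a.1 PySem.Set.empty) p))) := by
      by_cases h : faInner a.1 a.2 time_tkb = true
      · obtain ⟨t, ht, ps, hps, p, hp, hpd⟩ := (faInner_iff a.1 a.2 time_tkb).1 h
        have hc : PySem.Set.contains ((fbOccupied time_tkb).getD a.1 PySem.Set.empty) p = true :=
          (occ_contains_iff time_tkb hnd a.1 p).2 ⟨t, ht, ps, hps, hp⟩
        have hfalse : (a.2.all (fun p => !(PySem.Set.contains ((fbOccupied time_tkb).getD a.1 PySem.Set.empty) p))) = false := by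
          refine List.all_eq_false.2 ⟨p, hpd, ?_⟩
          simp only [hc, Bool.not_true]
          exact Bool.false_ne_true
        rw [h, hfalse]; rfl
      · have hfalse : faInner a.1 a.2 time_tkb = false := Bool.eq_false_iff.2 h
        have hall : (a.2.all (fun p => !(PySem.Set.contains ((fbOccupied time_tkb).getD a.1 PySem.Set.empty) p))) = true := by
          refine List.all_eq_true.2 ?_
          intro p hp
          by_contra hcp
          have hc : PySem.Set.contains ((fbOccupied time_tkb).getD a.1 PySem.Set.empty) p = true := by
            cases hctest : PySem.Set.contains ((fbOccupied time_tkb).getD a.1 PySem.Set.empty) p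
            · exact absurd (by rw [hctest]; rfl) hcp
            · rfl
          obtain ⟨t, ht, ps, hps, hpps⟩ := (occ_contains_iff time_tkb hnd a.1 p).1 hc
          exact h ((faInner_iff a.1 a.2 time_tkb).2 ⟨t, ht, ps, hps, p, hpps, hp⟩)
        rw [hfalse, hall]; rfl
    have hcons : fbFree (fbOccupied time_tkb) (a :: l)
        = ((a.2.all (fun p => !(PySem.Set.contains ((fbOccupied time_tkb).getD a.1 PySem.Set.empty) p)))
            && fbFree (fbOccupied time_tkb) l) := rfl
    show (if faInner a.1 a.2 time_tkb then true else faOuter time_tkb l) = _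
    rw [hcons, hhead, ih]
    generalize (a.2.all (fun p => !(PySem.Set.contains ((fbOccupied time_tkb).getD a.1 PySem.Set.empty) p))) = x
    generalize fbFree (fbOccupied time_tkb) l = y
    cases x <;> cases y <;> rfl

-- ===== VERDICT (by name: the statement is the Claim_ definition above) =====
theorem find_available_spec : Claim_equal_find_available := by
  intro hp tkb _ hpre
  unfold Spec_find_available find_available find_available_alt
  have hfun : (fun (nc : PySem.Dict String (List (String × List Int))) (p : String × List (String × List Int)) =>
        if faOuter tkb p.2 then nc else nc.insert p.1 p.2)
      = (fun (nc : PySem.Dict String (List (String × List Int))) (p : String × List (String × List Int)) =>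
        if fbFree (fbOccupied tkb) p.2 then nc.insert p.1 p.2 else nc) := by
    funext nc p
    rw [faOuter_eq tkb hpre p.2]
    cases fbFree (fbOccupied tkb) p.2 <;> simp
  rw [hfun]
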